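-- pv_equiv track=rewrite | github.com/Belvenix/AOC2023 | 3gear_ratios.py | is_part_overlapping_gear
-- ===== SOURCE A (Python) =====
-- def is_part_overlapping_gear(part: tuple[int, tuple[int, int, int]], gear: tuple[int, int]):
--     gear_i, gear_j = range(gear[0] - 1, gear[0] + 2), range(gear[1] - 1, gear[1] + 2)
--     _, (part_i, part_j, part_len) = part
--     for i in gear_i:
--         for j in gear_j:
--             part_positions = [(part_i, p_j) for p_j in range(part_j, part_j + part_len)]
--             if (i, j) in part_positions:
--                 return True
--     else:
--         return False
-- ===== SOURCE B (Python) =====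
-- def is_part_overlapping_gear(part: tuple[int, tuple[int, int, int]], gear: tuple[int, int]):
--     _, (part_i, part_j, part_len) = part
--     gear_i, gear_j = gear
--     return abs(part_i - gear_i) <= 1 and max(part_j, gear_j - 1) < min(part_j + part_len, gear_j + 2)
-- ===== Notes on version B (the rewrite author's own statement) =====
-- stated objective: faster
-- what changed: Replaces the 3x3 position enumeration and per-cell rebuild of the part's position list with a direct O(1) interval-intersection test on the row distance and column spans.
import Mathlib
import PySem

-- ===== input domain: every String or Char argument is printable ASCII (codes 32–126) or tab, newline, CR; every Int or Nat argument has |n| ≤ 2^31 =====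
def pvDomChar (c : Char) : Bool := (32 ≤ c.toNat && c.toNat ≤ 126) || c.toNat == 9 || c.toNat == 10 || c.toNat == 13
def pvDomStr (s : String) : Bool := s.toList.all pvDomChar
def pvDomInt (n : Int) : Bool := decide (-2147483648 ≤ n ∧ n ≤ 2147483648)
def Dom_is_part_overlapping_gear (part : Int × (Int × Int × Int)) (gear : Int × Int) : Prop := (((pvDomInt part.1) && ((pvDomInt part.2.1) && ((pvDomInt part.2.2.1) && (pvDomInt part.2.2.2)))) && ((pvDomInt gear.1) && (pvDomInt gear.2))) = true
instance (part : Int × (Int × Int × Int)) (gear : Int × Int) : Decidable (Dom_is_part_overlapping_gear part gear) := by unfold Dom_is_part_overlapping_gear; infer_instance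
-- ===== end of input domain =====

-- B replaces A's 3x3 position enumeration (rebuilding the part's position list per cell)
-- by a direct O(1) interval-intersection test; objective: faster.

-- ===== PORT A =====
-- Early `return True` inside the nested for-loops is ported as nested `List.any`.
def is_part_overlapping_gear (part : Int × (Int × Int × Int)) (gear : Int × Int) : Bool :=
  let gear_i := PySem.List.pyRange (gear.1 - 1) (gear.1 + 2) 1
  let gear_j := PySem.List.pyRange (gear.2 - 1) (gear.2 + 2) 1
  let part_i := part.2.1
  let part_j := part.2.2.1
  let part_len := part.2.2.2
  gear_i.any (fun i =>
    gear_j.any (fun j =>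
      let part_positions := (PySem.List.pyRange part_j (part_j + part_len) 1).map
        (fun p_j => (part_i, p_j))
      part_positions.contains (i, j)))

-- ===== PORT B =====
def is_part_overlapping_gear_alt (part : Int × (Int × Int × Int)) (gear : Int × Int) : Bool :=
  let part_i := part.2.1
  let part_j := part.2.2.1
  let part_len := part.2.2.2
  decide (|part_i - gear.1| ≤ 1) &&
    decide (max part_j (gear.2 - 1) < min (part_j + part_len) (gear.2 + 2))

-- ===== PRECONDITION & SPEC =====
def Spec_is_part_overlapping_gear (part : Int × (Int × Int × Int)) (gear : Int × Int) (out : Bool) : Prop := out = is_part_overlapping_gear_alt part gear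
instance (part : Int × (Int × Int × Int)) (gear : Int × Int) (out : Bool) : Decidable (Spec_is_part_overlapping_gear part gear out) := by unfold Spec_is_part_overlapping_gear; infer_instance

-- ===== CLAIM (what is proved, stated in full; the proofs are below) =====
def Claim_equal_is_part_overlapping_gear : Prop := ∀ (part : Int × (Int × Int × Int)) (gear : Int × Int), Dom_is_part_overlapping_gear part gear → Spec_is_part_overlapping_gear part gear (is_part_overlapping_gear part gear)

-- ===== LEMMAS AND PROOFS =====
theorem is_part_overlapping_gear_eq (part : Int × (Int × Int × Int)) (gear : Int × Int) :
    is_part_overlapping_gear part gear = is_part_overlapping_gear_alt part gear := by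
  obtain ⟨n, pi, pj, pl⟩ := part
  obtain ⟨gi, gj⟩ := gear
  rw [Bool.eq_iff_iff]
  simp only [is_part_overlapping_gear, is_part_overlapping_gear_alt,
    List.any_eq_true, List.contains_eq_mem, List.mem_map, PySem.List.mem_pyRange_one,
    decide_eq_true_eq, Prod.mk.injEq, Bool.and_eq_true]
  constructor
  · rintro ⟨i, ⟨hi1, hi2⟩, j, ⟨hj1, hj2⟩, pj', ⟨h1, h2⟩, hpi, hpj⟩
    exact ⟨abs_le.mpr ⟨by omega, by omega⟩, by omega⟩
  · rintro ⟨h1, h2⟩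
    obtain ⟨h1a, h1b⟩ := abs_le.mp h1
    refine ⟨pi, ⟨by omega, by omega⟩, max pj (gj - 1), ⟨by omega, by omega⟩,
      max pj (gj - 1), ⟨by omega, by omega⟩, rfl, rfl⟩

-- ===== VERDICT (by name: the statement is the Claim_ definition above) =====
theorem is_part_overlapping_gear_spec : Claim_equal_is_part_overlapping_gear := by
  intro part gear _
  exact is_part_overlapping_gear_eq part gear
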